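-- pv_equiv track=rewrite | github.com/ASSERT-KTH/Mokav | experiments/c4b/AADTI/iteration-10-sample-10-temp-1/generated_tests/1280/9021/temp_acc_qb.py | patched_func
-- ===== SOURCE A (Python) =====
-- def patched_func(*args):
-- 	global_list = []
--
-- 	a = int(args[0])
-- 	b = list(map(int, args[1].split()))
-- 	b.sort()
-- 	b.reverse()
-- 	suma = 0
-- 	cont = 0
-- 	for i in range(len(b)):
-- 	    if (suma >= a):
-- 	        break
-- 	    suma += b[i]
-- 	    cont += 1
-- 	if (suma >= a):
-- 	    global_list.append(cont)
-- 	else: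
-- 	    global_list.append((- 1))
-- 	return global_list
-- ===== SOURCE B (Python) =====
-- def patched_func(*args):
--     need = int(args[0])
--     pool = [int(t) for t in args[1].split()]
--     count = 0
--     while need > 0:
--         if not pool:
--             return [-1]
--         m = max(pool)
--         pool.remove(m)
--         need -= m
--         count += 1
--     return [count]
-- ===== Notes on version B (the rewrite author's own statement) =====
-- stated objective: alternative
-- what changed: B never sorts or accumulates a running sum: it tracks the remaining need (a minus what was taken), repeatedly extracts the current maximum with max+remove, and returns -1 early when the pool empties while need is still positive.
import Mathlib
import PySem

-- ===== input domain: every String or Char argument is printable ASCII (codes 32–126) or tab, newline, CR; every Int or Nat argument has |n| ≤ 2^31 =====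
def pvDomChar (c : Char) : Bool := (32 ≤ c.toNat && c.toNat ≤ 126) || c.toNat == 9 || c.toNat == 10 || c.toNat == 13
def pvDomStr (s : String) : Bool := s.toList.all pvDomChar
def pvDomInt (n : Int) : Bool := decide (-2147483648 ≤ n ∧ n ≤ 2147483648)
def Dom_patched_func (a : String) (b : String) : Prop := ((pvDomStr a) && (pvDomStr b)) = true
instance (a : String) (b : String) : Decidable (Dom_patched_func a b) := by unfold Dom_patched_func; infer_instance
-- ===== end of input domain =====

-- B drops the sort and the running sum: it tracks the remaining need and extracts maxima (max + remove) until need ≤ 0, returning -1 early if the pool empties; alternative algorithm.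

-- ===== PORT A =====
-- list(map(int, tokens)): none exactly when some int(token) raises
def pvInts? : List String → Option (List Int)
  | [] => some []
  | s :: t =>
    match PySem.Int.ofStr? s, pvInts? t with
    | some v, some vs => some (v :: vs)
    | _, _ => none

-- the for-i-in-range loop with its break, as structural recursion over the (desc-sorted) list
def pvLoopA (a : Int) : List Int → Int → Int → Int × Int
  | [], suma, cont => (suma, cont)
  | x :: t, suma, cont =>
    if suma ≥ a then (suma, cont)
    else pvLoopA a t (suma + x) (cont + 1)

def patched_func (a : String) (b : String) : List Int :=
  match PySem.Int.ofStr? a, pvInts? (PySem.Str.split₀ b) with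
  | some av, some bs =>
    -- b.sort(); b.reverse()
    let bd := (PySem.List.sorted bs (fun x => x) false).reverse
    let r := pvLoopA av bd 0 0
    if r.1 ≥ av then [r.2] else [-1]
  | _, _ => []  -- int() raised (excluded by Pre_)

-- ===== PORT B =====
-- while need > 0: return [-1] if pool empty; m = max(pool); pool.remove(m); need -= m; count += 1
-- fuel = len(pool) bounds the iterations (each step removes one element; the fallthrough arm is unreachable)
def pvTakeB : Nat → List Int → Int → Int → List Int
  | fuel, pool, need, count =>
    if need ≤ 0 then [count]
    else
      match PySem.List.max? pool (fun x => x) with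
      | none => [-1]
      | some m =>
        match fuel, PySem.List.remove? pool m with
        | f + 1, some pool' => pvTakeB f pool' (need - m) (count + 1)
        | _, _ => [-1]

def patched_func_alt (a : String) (b : String) : List Int :=
  (((PySem.Int.ofStr? a).bind fun need =>
      ((PySem.Str.split₀ b).mapM PySem.Int.ofStr?).map fun pool =>
        pvTakeB pool.length pool need 0)).getD []

-- ===== PRECONDITION & SPEC =====
-- Pre_: int(args[0]) and every int(token) succeed; otherwise Python A raises ValueError.
def Pre_patched_func (a : String) (b : String) : Prop :=
  (PySem.Int.ofStr? a).isSome = true ∧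
  ∀ s ∈ PySem.Str.split₀ b, (PySem.Int.ofStr? s).isSome = true
instance (a : String) (b : String) : Decidable (Pre_patched_func a b) := by
  unfold Pre_patched_func; infer_instance
def pvWitness_patched_func : String × String := ("5", "1 2 3")

def Spec_patched_func (a : String) (b : String) (out : List Int) : Prop := out = patched_func_alt a b
instance (a : String) (b : String) (out : List Int) : Decidable (Spec_patched_func a b out) := by unfold Spec_patched_func; infer_instance

-- ===== CLAIM =====
def Claim_equal_patched_func : Prop := ∀ (a : String) (b : String), Dom_patched_func a b → Pre_patched_func a b → Spec_patched_func a b (patched_func a b)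

-- ===== LEMMAS AND PROOFS =====

lemma pvInts?_eq_mapM (ts : List String) : ts.mapM PySem.Int.ofStr? = pvInts? ts := by
  induction ts with
  | nil => rfl
  | cons s t ih =>
    simp only [List.mapM_cons, pvInts?, ← ih]
    cases PySem.Int.ofStr? s with
    | none => rfl
    | some v =>
      cases t.mapM PySem.Int.ofStr? with
      | none => rfl
      | some vs => rfl

-- a maximum can be peeled off the descending sort
lemma desc_sorted_cons_max (bs : List Int) (m : Int) (hm : m ∈ bs)
    (hmax : ∀ y ∈ bs, y ≤ m) :
    (PySem.List.sorted bs (fun x => x) false).reverse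
      = m :: (PySem.List.sorted (bs.erase m) (fun x => x) false).reverse := by
  have key : PySem.List.sorted bs (fun x => x) false
      = (PySem.List.sorted (bs.erase m) (fun x => x) false) ++ [m] := by
    have hperm : ((PySem.List.sorted (bs.erase m) (fun x => x) false) ++ [m]).Perm bs :=
      (((PySem.List.sorted_perm (bs.erase m) (fun x => x) false).append_right [m]).trans
        (List.perm_append_singleton m (bs.erase m))).trans (List.perm_cons_erase hm).symm
    apply PySem.List.sorted_id_eq_of_perm_of_pairwise _ _ hperm
    · rw [List.pairwise_append]
      refine ⟨PySem.List.sorted_pairwise (bs.erase m) (fun x => x), List.pairwise_singleton _ _, ?_⟩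
      intro x hx y hy
      rw [List.mem_singleton] at hy
      rw [hy]
      have hxmem : x ∈ bs.erase m := (PySem.List.mem_sorted _ _ _ _).1 hx
      exact hmax x (List.mem_of_mem_erase hxmem)
  rw [key, List.reverse_append, List.reverse_singleton, List.singleton_append]

-- B's need-driven selection equals A's scan of the descending-sorted list followed by the final test
lemma takeB_eq_loopA (a : Int) (n : Nat) (bs : List Int) (s c : Int)
    (hn : bs.length = n) :
    pvTakeB n bs (a - s) c
      = (let r := pvLoopA a ((PySem.List.sorted bs (fun x => x) false).reverse) s c;
         if r.1 ≥ a then [r.2] else [-1]) := by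
  induction n generalizing bs s c with
  | zero =>
    have hbs : bs = [] := List.length_eq_zero_iff.1 hn
    subst hbs
    rw [pvTakeB]
    by_cases h : a - s ≤ 0
    · simp [h, pvLoopA, PySem.List.sorted, show s ≥ a by omega]
    · simp [h, pvLoopA, PySem.List.sorted, PySem.List.max?,
        show ¬ s ≥ a by omega]
  | succ k ih =>
    have hne : bs ≠ [] := by intro h; subst h; simp at hn
    rw [pvTakeB]
    by_cases h : a - s ≤ 0
    · -- need ≤ 0: A's loop also stops at once (suma ≥ a)
      have hs : s ≥ a := by omega
      cases hd : (PySem.List.sorted bs (fun x => x) false).reverse with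
      | nil => simp [h, pvLoopA, hs]
      | cons x t => simp [h, pvLoopA, hs]
    · obtain ⟨m, hm⟩ : ∃ m, PySem.List.max? bs (fun x => x) = some m := by
        cases hmx : PySem.List.max? bs (fun x => x) with
        | none => exact absurd ((PySem.List.max?_eq_none_iff bs (fun x => x)).1 hmx) hne
        | some m => exact ⟨m, rfl⟩
      have hmem : m ∈ bs := PySem.List.max?_mem hm
      have hmax : ∀ y ∈ bs, y ≤ m := PySem.List.max?_isMax hm
      have hrem : PySem.List.remove? bs m = some (bs.erase m) :=
        PySem.List.remove?_eq_some_erase bs m hmem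
      have hlen : (bs.erase m).length = k := by
        have := List.length_erase_of_mem hmem
        omega
      have harith : a - s - m = a - (s + m) := by ring
      simp only [h, if_false, hm, hrem]
      rw [harith, ih (bs.erase m) (s + m) (c + 1) hlen,
        desc_sorted_cons_max bs m hmem hmax, pvLoopA]
      simp [show ¬ s ≥ a by omega]

-- ===== VERDICT =====
theorem patched_func_spec : Claim_equal_patched_func := by
  intro a b _ _
  unfold Spec_patched_func patched_func patched_func_alt
  rw [pvInts?_eq_mapM]
  cases ha : PySem.Int.ofStr? a with
  | none => rfl
  | some av =>
    cases hb : pvInts? (PySem.Str.split₀ b) with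
    | none => rfl
    | some bs =>
      simp only [Option.bind_some, Option.map_some, Option.getD_some]
      have := takeB_eq_loopA av bs.length bs 0 0 rfl
      rw [show av - 0 = av by ring] at this
      rw [this]
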